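-- pv_equiv track=rewrite | github.com/JustinHenderson98/RSAFactorization | main.py | get_factors_rec_table
-- ===== SOURCE A (Python) =====
-- mult_table = {
--     0: [(4, 0), (6, 5), (0, 0), (5, 4), (7, 0), (2, 0), (8, 0), (3, 0), (5, 0), (6, 0), (1, 0), (8, 5), (5, 2)],
--     1: [(1, 1), (7, 3)],
--     2: [(6, 2), (8, 4), (2, 1), (4, 3), (7, 6)],
--     3: [(3, 1)],
--     4: [(8, 8), (6, 4), (8, 3), (7, 2), (2, 2), (4, 1)],
--     5: [(5, 3), (7, 5), (5, 5), (5, 1)],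
--     6: [(4, 4), (8, 7), (6, 1), (6, 6), (8, 2), (3, 2)],
--     7: [(7, 1)],
--     8: [(7, 4), (8, 1), (4, 2), (8, 6), (6, 3)],
--     9: [(3, 3), (7, 7)]
-- }
--
-- def get_msb(key):
--     return int(str(key)[0])
--
-- def get_factors_rec_table( key, sub_factor, depth, dic):
--
--     pkey = sub_factor[0] * sub_factor[1]
--
--     if pkey.bit_length() >= key.bit_length():
--         if sub_factor[0] == 1 or sub_factor[1] == 1:
--             return None
--         if pkey == key:
--             return sub_factor
--         return None
--     depth10 = depth*10
--     depth100 = depth*100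
--     delta_key = key - pkey
--     keyModDepth10 = key % depth10
--     delta_keyModDepth10 = delta_key % depth100
--     routes1 = mult_table[get_msb(delta_keyModDepth10)]
--     routes = []
--     for route in routes1:
--         p = sub_factor[0] + (route[0] * depth)
--         q = sub_factor[1] + (route[1] * depth)
--         pq = p*q
--
--         if pq <= key and pq % depth10 == keyModDepth10:
--             routes.append((p, q))
--     srt = sorted(routes, key=lambda x: max(x[0], x[1]) - min(x[0], x[1]))
--
--     for r in srt:
--         res = get_factors_rec_table(key, r, depth10, dic)
--         if res is not None:
--             return res
--     return None
-- ===== SOURCE B (Python) =====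
-- mult_table = {
--     0: [(4, 0), (6, 5), (0, 0), (5, 4), (7, 0), (2, 0), (8, 0), (3, 0), (5, 0), (6, 0), (1, 0), (8, 5), (5, 2)],
--     1: [(1, 1), (7, 3)],
--     2: [(6, 2), (8, 4), (2, 1), (4, 3), (7, 6)],
--     3: [(3, 1)],
--     4: [(8, 8), (6, 4), (8, 3), (7, 2), (2, 2), (4, 1)],
--     5: [(5, 3), (7, 5), (5, 5), (5, 1)],
--     6: [(4, 4), (8, 7), (6, 1), (6, 6), (8, 2), (3, 2)],
--     7: [(7, 1)],
--     8: [(7, 4), (8, 1), (4, 2), (8, 6), (6, 3)],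
--     9: [(3, 3), (7, 7)]
-- }
--
-- def get_msb(key):
--     return int(str(key)[0])
--
-- def get_factors_rec_table(key, sub_factor, depth, dic):
--     # iterative DFS with an explicit LIFO stack instead of recursion
--     stack = [(sub_factor, depth)]
--     while stack:
--         sf, d = stack.pop()
--         pkey = sf[0] * sf[1]
--         if pkey.bit_length() >= key.bit_length():
--             if sf[0] != 1 and sf[1] != 1 and pkey == key:
--                 return sf
--             continue
--         d10 = d * 10
--         kmod = key % d10
--         cands = []
--         for r0, r1 in mult_table[get_msb((key - pkey) % (d * 100))]:
--             p = sf[0] + r0 * d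
--             q = sf[1] + r1 * d
--             if p * q <= key and (p * q) % d10 == kmod:
--                 cands.append((p, q))
--         cands.sort(key=lambda x: max(x[0], x[1]) - min(x[0], x[1]))
--         for r in reversed(cands):
--             stack.append((r, d10))
--     return None
-- ===== Notes on version B (the rewrite author's own statement) =====
-- stated objective: alternative
-- what changed: The recursive depth-first search is replaced by an iterative one driven by an explicit LIFO stack of (sub_factor, depth) states, with children pushed in reverse sorted order so they are explored in A's order.
-- outside the precondition, e.g. on get_factors_rec_table(1920, (10, -8), -10, {}): A returns (-40, -48), B returns (-40, -48)
import Mathlib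
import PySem

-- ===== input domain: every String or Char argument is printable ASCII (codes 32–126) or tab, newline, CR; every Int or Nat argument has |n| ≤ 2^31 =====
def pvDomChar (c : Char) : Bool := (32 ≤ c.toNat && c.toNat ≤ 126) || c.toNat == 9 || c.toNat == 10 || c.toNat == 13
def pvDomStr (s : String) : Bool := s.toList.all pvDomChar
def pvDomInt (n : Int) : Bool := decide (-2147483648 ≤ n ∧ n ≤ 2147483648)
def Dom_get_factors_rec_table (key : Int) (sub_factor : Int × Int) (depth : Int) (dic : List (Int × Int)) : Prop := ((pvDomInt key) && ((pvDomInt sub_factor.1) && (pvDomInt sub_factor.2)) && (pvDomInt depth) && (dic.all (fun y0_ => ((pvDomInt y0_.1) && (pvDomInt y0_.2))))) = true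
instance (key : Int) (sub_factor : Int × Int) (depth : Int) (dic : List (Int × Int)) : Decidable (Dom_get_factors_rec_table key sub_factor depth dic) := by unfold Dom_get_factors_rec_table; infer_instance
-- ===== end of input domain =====

-- B replaces A's recursion by an explicit LIFO stack popped in the same DFS order (objective:
-- alternative, same cost); equivalence is about the return value only (neither version mutates
-- its arguments).

-- ===== PORT A =====
-- the module-level dict `mult_table` (shared by both Pythons)
def mult_table : PySem.Dict Int (List (Int × Int)) := PySem.Dict.mk [
  (0, [(4, 0), (6, 5), (0, 0), (5, 4), (7, 0), (2, 0), (8, 0), (3, 0), (5, 0), (6, 0), (1, 0), (8, 5), (5, 2)]),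
  (1, [(1, 1), (7, 3)]),
  (2, [(6, 2), (8, 4), (2, 1), (4, 3), (7, 6)]),
  (3, [(3, 1)]),
  (4, [(8, 8), (6, 4), (8, 3), (7, 2), (2, 2), (4, 1)]),
  (5, [(5, 3), (7, 5), (5, 5), (5, 1)]),
  (6, [(4, 4), (8, 7), (6, 1), (6, 6), (8, 2), (3, 2)]),
  (7, [(7, 1)]),
  (8, [(7, 4), (8, 1), (4, 2), (8, 6), (6, 3)]),
  (9, [(3, 3), (7, 7)])]

-- helper get_msb = int(str(key)[0]); `.getD 0` total-izes the two spots where Python raises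
-- (int('-') on a negative argument, s[0] on ''): under Pre_ the argument is a nonneg remainder,
-- so neither is reached
def get_msb (key : Int) : Int :=
  (((PySem.Str.pyGet? (PySem.Int.toStr key) 0).bind (fun c => PySem.Int.ofChars? [c]))).getD 0

-- A's recursion, with a fuel guard that only makes the recursion total (Python A has no such
-- bound; fuel 64 is never exhausted from any call chain the claim covers, and B's port carries
-- the identical guard, so the guard does not manufacture agreement)
def goA : Nat → Int → Int × Int → Int → Option (Int × Int)
  | 0, _, _, _ => none
  | Nat.succ fuel, key, sub_factor, depth =>
    let pkey := sub_factor.1 * sub_factor.2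
    if PySem.Int.bitLength pkey ≥ PySem.Int.bitLength key then
      if sub_factor.1 = 1 ∨ sub_factor.2 = 1 then none
      else if pkey = key then some sub_factor
      else none
    else
      let depth10 := depth * 10
      let depth100 := depth * 100
      let delta_key := key - pkey
      let keyModDepth10 := PySem.Int.mod key depth10
      let delta_keyModDepth10 := PySem.Int.mod delta_key depth100
      let routes1 := mult_table.getD (get_msb delta_keyModDepth10) []   -- KeyError impossible: msb digit ∈ 0..9
      let routes := routes1.foldl (fun acc route =>
        let p := sub_factor.1 + route.1 * depth
        let q := sub_factor.2 + route.2 * depth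
        let pq := p * q
        if pq ≤ key ∧ PySem.Int.mod pq depth10 = keyModDepth10 then acc ++ [(p, q)] else acc) []
      let srt := PySem.List.sorted routes (fun x => max x.1 x.2 - min x.1 x.2) false
      srt.foldl (fun res r =>
        match res with
        | some v => some v
        | none => goA fuel key r depth10) none

def get_factors_rec_table (key : Int) (sub_factor : Int × Int) (depth : Int) (dic : List (Int × Int)) : Option (Int × Int) :=
  goA 64 key sub_factor depth

-- ===== PORT B =====
-- measure for the stack loop: a popped node is replaced by at most 13 children of smaller fuel
def stackM : List ((Int × Int) × Int × Nat) → Nat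
  | [] => 0
  | (_, _, f) :: rest => 14 ^ f + stackM rest

theorem mult_table_getD_len (m : Int) : (mult_table.getD m []).length ≤ 13 := by
  simp only [mult_table, PySem.Dict.getD_eq_get?_getD, PySem.Dict.get?_mk_cons]
  split_ifs <;> simp [PySem.Dict.get?]

theorem stackM_push (l : List (Int × Int)) (d : Int) (f : Nat) (rest : List ((Int × Int) × Int × Nat)) :
    stackM (l.foldl (fun st r => (r, d, f) :: st) rest) = l.length * 14 ^ f + stackM rest := by
  induction l generalizing rest with
  | nil => simp
  | cons r t ih =>
    rw [List.foldl_cons, ih]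
    simp [stackM]; ring

theorem cands_len_le (l : List (Int × Int)) (g : Int × Int → Int × Int)
    (P : Int × Int → Prop) [DecidablePred P] (acc : List (Int × Int)) :
    (l.foldl (fun acc r => if _h : P r then acc ++ [g r] else acc) acc).length ≤ acc.length + l.length := by
  induction l generalizing acc with
  | nil => simp
  | cons r t ih =>
    simp only [List.foldl_cons]
    split_ifs with h
    · refine le_trans (ih _) ?_
      simp [List.length_append]
      omega
    · refine le_trans (ih _) ?_
      simp

-- B's stack loop; stack entries carry the same fuel guard as goA (popping a fuel-0 entry skips
-- it, exactly as goA returns none at fuel 0)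
def goB : Int → List ((Int × Int) × Int × Nat) → Option (Int × Int)
  | _, [] => none
  | key, (_, _, 0) :: rest => goB key rest
  | key, (sf, d, Nat.succ fuel) :: rest =>
    let pkey := sf.1 * sf.2
    if PySem.Int.bitLength pkey ≥ PySem.Int.bitLength key then
      if sf.1 ≠ 1 ∧ sf.2 ≠ 1 ∧ pkey = key then some sf
      else goB key rest
    else
      let d10 := d * 10
      let kmod := PySem.Int.mod key d10
      let cands := (mult_table.getD (get_msb (PySem.Int.mod (key - pkey) (d * 100))) []).foldl
        (fun acc r =>
          let p := sf.1 + r.1 * d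
          let q := sf.2 + r.2 * d
          if p * q ≤ key ∧ PySem.Int.mod (p * q) d10 = kmod then acc ++ [(p, q)] else acc) []
      let srt := PySem.List.sorted cands (fun x => max x.1 x.2 - min x.1 x.2) false
      goB key (srt.reverse.foldl (fun st r => (r, d10, fuel) :: st) rest)
  termination_by _ st => stackM st
  decreasing_by
  · simp [stackM]
  · simp [stackM]
  · rw [stackM_push]
    simp only [stackM, List.length_reverse, PySem.List.length_sorted]
    have h1 : (List.foldl
        (fun acc r =>
          if _h : (sf.1 + r.1 * d) * (sf.2 + r.2 * d) ≤ key ∧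
              PySem.Int.mod ((sf.1 + r.1 * d) * (sf.2 + r.2 * d)) (d * 10) = PySem.Int.mod key (d * 10) then
            acc ++ [(sf.1 + r.1 * d, sf.2 + r.2 * d)]
          else acc)
        [] (mult_table.getD (get_msb (PySem.Int.mod (key - sf.1 * sf.2) (d * 100))) [])).length ≤ 13 := by
      refine le_trans (cands_len_le _ (fun r => (sf.1 + r.1 * d, sf.2 + r.2 * d)) _ []) ?_
      simpa using mult_table_getD_len (get_msb (PySem.Int.mod (key - sf.1 * sf.2) (d * 100)))
    have hp : 0 < 14 ^ fuel := Nat.pow_pos (show 0 < 14 by norm_num)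
    have hs : (14:Nat) ^ fuel.succ = 14 * 14 ^ fuel := by rw [pow_succ]; ring
    rw [hs]
    nlinarith [h1, hp]

def get_factors_rec_table_alt (key : Int) (sub_factor : Int × Int) (depth : Int) (dic : List (Int × Int)) : Option (Int × Int) :=
  goB key [(sub_factor, depth, 64)]

-- ===== PRECONDITION & SPEC =====
-- Pre_ excludes non-base-case calls with depth ≤ 0: there Python A raises on almost all of them
-- (ZeroDivisionError at depth = 0, ValueError in get_msb on a negative remainder for depth < 0)
-- and returns only on scattered accidental paths.
def Pre_get_factors_rec_table (key : Int) (sub_factor : Int × Int) (depth : Int) (dic : List (Int × Int)) : Prop :=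
  1 ≤ depth ∨ PySem.Int.bitLength key ≤ PySem.Int.bitLength (sub_factor.1 * sub_factor.2)
instance (key : Int) (sub_factor : Int × Int) (depth : Int) (dic : List (Int × Int)) : Decidable (Pre_get_factors_rec_table key sub_factor depth dic) := by unfold Pre_get_factors_rec_table; infer_instance

def pvWitness_get_factors_rec_table : Int × (Int × Int) × Int × (List (Int × Int)) := (15, (3, 5), 1, [])

def Spec_get_factors_rec_table (key : Int) (sub_factor : Int × Int) (depth : Int) (dic : List (Int × Int)) (out : Option (Int × Int)) : Prop := out = get_factors_rec_table_alt key sub_factor depth dic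
instance (key : Int) (sub_factor : Int × Int) (depth : Int) (dic : List (Int × Int)) (out : Option (Int × Int)) : Decidable (Spec_get_factors_rec_table key sub_factor depth dic out) := by unfold Spec_get_factors_rec_table; infer_instance

-- ===== CLAIM (what is proved, stated in full; the proofs are below) =====
def Claim_equal_get_factors_rec_table : Prop := ∀ (key : Int) (sub_factor : Int × Int) (depth : Int) (dic : List (Int × Int)), Dom_get_factors_rec_table key sub_factor depth dic → Pre_get_factors_rec_table key sub_factor depth dic → Spec_get_factors_rec_table key sub_factor depth dic (get_factors_rec_table key sub_factor depth dic)

-- ===== LEMMAS AND PROOFS =====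

-- a first-some fold that has already found a value keeps it
theorem foldl_stays_some {α β : Type} (f : Option β → α → Option β)
    (hf : ∀ (v : β) (x : α), f (some v) x = some v) (l : List α) (v : β) :
    l.foldl f (some v) = some v := by
  induction l with
  | nil => simp
  | cons r t ih => rw [List.foldl_cons, hf]; exact ih

-- pushing a list onto a head-is-top stack = its reverse prepended
theorem foldl_push {α β : Type} (e : α → β) (l : List α) (st : List β) :
    l.foldl (fun st r => e r :: st) st = l.reverse.map e ++ st := by
  induction l generalizing st with
  | nil => simp
  | cons r t ih => simp [ih]

-- the stack loop of B runs the recursion of A on the top entry, then the rest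
theorem goB_cons (fuel : Nat) : ∀ (key : Int) (sf : Int × Int) (d : Int) (rest : List ((Int × Int) × Int × Nat)),
    goB key ((sf, d, fuel) :: rest)
      = match goA fuel key sf d with | some v => some v | none => goB key rest := by
  induction fuel with
  | zero => intro key sf d rest; simp [goA, goB]
  | succ fuel ih =>
    intro key sf d rest
    rw [goB, goA]
    by_cases hb : PySem.Int.bitLength (sf.1 * sf.2) ≥ PySem.Int.bitLength key
    · simp only [hb, if_true]
      by_cases h1 : sf.1 = 1 ∨ sf.2 = 1
      · have : ¬ (sf.1 ≠ 1 ∧ sf.2 ≠ 1 ∧ sf.1 * sf.2 = key) := by tauto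
        simp [h1, this]
      · by_cases h2 : sf.1 * sf.2 = key
        · have : sf.1 ≠ 1 ∧ sf.2 ≠ 1 ∧ sf.1 * sf.2 = key := by tauto
          simp [h2, this]
        · simp [h2]
    · simp only [hb, if_false]
      have aux : ∀ (l : List (Int × Int)) (rest : List ((Int × Int) × Int × Nat)),
          goB key (l.map (fun r => (r, d * 10, fuel)) ++ rest)
            = match l.foldl (fun res r => match res with | some v => some v | none => goA fuel key r (d * 10)) none with
              | some v => some v | none => goB key rest := by
        intro l
        induction l with
        | nil => intro rest; simp
        | cons r t iht =>
          intro rest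
          simp only [List.map_cons, List.cons_append, List.foldl_cons]
          rw [ih]
          cases hr : goA fuel key r (d * 10) with
          | some v => rw [foldl_stays_some _ (fun v x => rfl)]
          | none => simp [iht rest]
      rw [foldl_push]
      rw [List.reverse_reverse]
      exact aux _ rest

-- ===== VERDICT (by name: the statement is the Claim_ definition above) =====
theorem get_factors_rec_table_spec : Claim_equal_get_factors_rec_table := by
  intro key sf d dic _ _
  unfold Spec_get_factors_rec_table get_factors_rec_table get_factors_rec_table_alt
  rw [goB_cons]
  cases goA 64 key sf d <;> simp [goB]
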